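-- pv_equiv track=rewrite | github.com/rsjones94/pyfluv | pyfluv/streammath.py | make_monotonic
-- ===== SOURCE A (Python) =====
-- import itertools
--
-- def strip_doubles(series):
--     """
--     Returns a list based on the input list where all elements identical to the previous element are removed.
--     Name is misleading; will strip every identical value that is identical to an adjacent value
--     (so [2,2,2] --> [2])
--     """
--     stripped = [i for i,_ in itertools.groupby(series)]
--     return(stripped)
--
-- def make_monotonic(series,increasing = True, removeDuplicates = False):
--     """
--     Makes a list monotonic increasing (default) or decreasing by removing subsequent elements which violate montoticity.
--
--     Args:
--         series: a list of numbers
--         increasing: a bool; True if you want the the list to monotonic increasing, False if monotonic decreasing.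
--         removeDuplicates: bool; set to True to remove an element if the element preceding it is identical.
--
--     Returns:
--         The list with the elements violating monoticity removed.
--
--     Raises:
--         None.
--     """
--     newSeries = [series[0]]
--     anchor = series[0]
--     for i,_ in enumerate(series[1:],1):
--         checkVal = series[i]
--         if increasing and checkVal >= anchor:
--             newSeries.append(checkVal)
--             anchor = checkVal
--         elif not increasing and checkVal <= anchor:
--             newSeries.append(checkVal)
--             anchor = checkVal
--
--     if removeDuplicates:
--         newSeries = strip_doubles(newSeries)
--
--     return(newSeries)
-- ===== SOURCE B (Python) =====
-- import itertools
--
-- def make_monotonic(series, increasing=True, removeDuplicates=False):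
--     head = series[0]
--     op = max if increasing else min
--     prefix = list(itertools.accumulate(series, op))
--     if increasing:
--         newSeries = [head] + [v for v, p in zip(series[1:], prefix) if v >= p]
--     else:
--         newSeries = [head] + [v for v, p in zip(series[1:], prefix) if v <= p]
--     if removeDuplicates:
--         newSeries = [k for k, _ in itertools.groupby(newSeries)]
--     return newSeries
-- ===== Notes on version B (the rewrite author's own statement) =====
-- stated objective: alternative
-- what changed: Replaces the single loop threading a mutable anchor through ordered branches by a two-pass scheme: a prefix running-extremum table built with itertools.accumulate, then a zip/comprehension selection pass comparing each element to the extremum of its predecessors.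
import Mathlib
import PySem

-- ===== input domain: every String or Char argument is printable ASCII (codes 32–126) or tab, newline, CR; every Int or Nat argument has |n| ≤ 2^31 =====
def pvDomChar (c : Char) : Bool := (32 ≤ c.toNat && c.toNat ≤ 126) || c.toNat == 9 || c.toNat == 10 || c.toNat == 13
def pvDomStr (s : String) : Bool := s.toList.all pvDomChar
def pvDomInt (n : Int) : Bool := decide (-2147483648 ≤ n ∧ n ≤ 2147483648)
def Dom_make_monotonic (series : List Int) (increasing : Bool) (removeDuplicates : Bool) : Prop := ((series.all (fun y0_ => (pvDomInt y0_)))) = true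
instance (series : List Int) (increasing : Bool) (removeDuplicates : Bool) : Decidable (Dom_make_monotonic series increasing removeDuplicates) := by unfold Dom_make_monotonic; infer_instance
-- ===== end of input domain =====

-- B replaces A's anchor-threading loop by an accumulate-built prefix-extremum table plus a zip/selection pass; same O(n) cost, different decomposition. A raises IndexError on [], excluded by Pre_.


-- ===== PORT A =====
-- strip_doubles: '[i for i,_ in itertools.groupby(series)]' = heads of runs of equal adjacent elements (exact)
def strip_doubles : List Int → List Int
  | [] => []
  | [x] => [x]
  | x :: y :: xs => if x = y then strip_doubles (y :: xs) else x :: strip_doubles (y :: xs)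

-- A: 'for i,_ in enumerate(series[1:],1): checkVal = series[i]; …' ported as a fold of the
-- indices 1..len-1 reading series[i] via pyGetD (in range for every visited i; series[0] in range under Pre_)
def make_monotonic (series : List Int) (increasing : Bool) (removeDuplicates : Bool) : List Int :=
  let s0 : Int := PySem.List.pyGetD series 0 0
  let st := (PySem.List.pyRange 1 (series.length : Int) 1).foldl
      (fun (st : List Int × Int) (i : Int) =>
        let checkVal := PySem.List.pyGetD series i 0
        if increasing && decide (st.2 ≤ checkVal) then (st.1 ++ [checkVal], checkVal)
        else if !increasing && decide (checkVal ≤ st.2) then (st.1 ++ [checkVal], checkVal)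
        else st)
      ([s0], s0)
  let newSeries := st.1
  if removeDuplicates then strip_doubles newSeries else newSeries

-- ===== PORT B =====
-- B: prefix extremum table via accumulate (= List.scanl), then a zip/selection pass; groupby tail shared with A
def make_monotonic_alt (series : List Int) (increasing : Bool) (removeDuplicates : Bool) : List Int :=
  match series with
  | [] => []   -- Python B raises IndexError on series[0]; excluded by Pre_
  | x :: xs =>
    let op : Int → Int → Int := fun a b => if increasing then max a b else min a b
    let pfx := List.scanl op x xs
    let newSeries :=
      if increasing then
        x :: (xs.zip pfx).filterMap (fun p => if p.2 ≤ p.1 then some p.1 else none)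
      else
        x :: (xs.zip pfx).filterMap (fun p => if p.1 ≤ p.2 then some p.1 else none)
    if removeDuplicates then strip_doubles newSeries else newSeries

-- ===== PRECONDITION & SPEC =====
-- A evaluates series[0]: it raises IndexError exactly on the empty list (B raises there too)
def Pre_make_monotonic (series : List Int) (increasing : Bool) (removeDuplicates : Bool) : Prop := series ≠ []
instance (series : List Int) (increasing : Bool) (removeDuplicates : Bool) : Decidable (Pre_make_monotonic series increasing removeDuplicates) := by unfold Pre_make_monotonic; infer_instance
def pvWitness_make_monotonic : List Int × Bool × Bool := ([3, 1, 4], true, false)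

def Spec_make_monotonic (series : List Int) (increasing : Bool) (removeDuplicates : Bool) (out : List Int) : Prop := out = make_monotonic_alt series increasing removeDuplicates
instance (series : List Int) (increasing : Bool) (removeDuplicates : Bool) (out : List Int) : Decidable (Spec_make_monotonic series increasing removeDuplicates out) := by unfold Spec_make_monotonic; infer_instance

-- ===== CLAIM (what is proved, stated in full; the proofs are below) =====
def Claim_equal_make_monotonic : Prop := ∀ (series : List Int) (increasing : Bool) (removeDuplicates : Bool), Dom_make_monotonic series increasing removeDuplicates → Pre_make_monotonic series increasing removeDuplicates → Spec_make_monotonic series increasing removeDuplicates (make_monotonic series increasing removeDuplicates)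

-- ===== LEMMAS AND PROOFS =====

-- the common selection both ports compute: keep v and advance the anchor to v, else drop v
def selInc : Int → List Int → List Int
  | _, [] => []
  | a, v :: vs => if a ≤ v then v :: selInc v vs else selInc a vs

def selDec : Int → List Int → List Int
  | _, [] => []
  | a, v :: vs => if v ≤ a then v :: selDec v vs else selDec a vs

theorem foldInc_aux (xs : List Int) : ∀ (acc : List Int) (a : Int),
    (xs.foldl (fun (st : List Int × Int) (v : Int) =>
        if st.2 ≤ v then (st.1 ++ [v], v) else st) (acc, a)).1 = acc ++ selInc a xs := by
  induction xs with
  | nil => intro acc a; simp [selInc]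
  | cons v vs ih =>
    intro acc a
    simp only [List.foldl_cons]
    by_cases h : a ≤ v
    · simp only [h, if_true]
      rw [ih]
      simp [selInc, h]
    · simp only [h, if_false]
      rw [ih]
      simp [selInc, h]

theorem foldDec_aux (xs : List Int) : ∀ (acc : List Int) (a : Int),
    (xs.foldl (fun (st : List Int × Int) (v : Int) =>
        if v ≤ st.2 then (st.1 ++ [v], v) else st) (acc, a)).1 = acc ++ selDec a xs := by
  induction xs with
  | nil => intro acc a; simp [selDec]
  | cons v vs ih =>
    intro acc a
    simp only [List.foldl_cons]
    by_cases h : v ≤ a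
    · simp only [h, if_true]
      rw [ih]
      simp [selDec, h]
    · simp only [h, if_false]
      rw [ih]
      simp [selDec, h]

theorem scanB_inc (xs : List Int) : ∀ (x : Int),
    (xs.zip (List.scanl (fun a b => max a b) x xs)).filterMap
        (fun p => if p.2 ≤ p.1 then some p.1 else none) = selInc x xs := by
  induction xs with
  | nil => intro x; simp [selInc]
  | cons v vs ih =>
    intro x
    rw [List.scanl_cons]
    by_cases h : x ≤ v
    · simp [selInc, h, ih]
    · simp [selInc, h, max_eq_left (le_of_not_ge h), ih]

theorem scanB_dec (xs : List Int) : ∀ (x : Int),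
    (xs.zip (List.scanl (fun a b => min a b) x xs)).filterMap
        (fun p => if p.1 ≤ p.2 then some p.1 else none) = selDec x xs := by
  induction xs with
  | nil => intro x; simp [selDec]
  | cons v vs ih =>
    intro x
    rw [List.scanl_cons]
    by_cases h : v ≤ x
    · simp [selDec, h, ih]
    · simp [selDec, h, min_eq_left (le_of_not_ge h), ih]

theorem pyGetD_head (x : Int) (xs : List Int) : PySem.List.pyGetD (x :: xs) 0 0 = x := by
  simp [PySem.List.pyGetD, PySem.List.pyGet?, PySem.List.pyIdx?]

theorem make_monotonic_eq (x : Int) (xs : List Int) (increasing removeDuplicates : Bool) :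
    make_monotonic (x :: xs) increasing removeDuplicates
      = make_monotonic_alt (x :: xs) increasing removeDuplicates := by
  have hbr := PySem.List.foldl_pyRange_pyGetD' (x :: xs) (0 : Int)
      (fun (st : List Int × Int) (v : Int) =>
        if increasing && decide (st.2 ≤ v) then (st.1 ++ [v], v)
        else if !increasing && decide (v ≤ st.2) then (st.1 ++ [v], v)
        else st) ([x], x) (a := 1) (by norm_num)
  cases increasing with
  | true =>
    simp only [make_monotonic, make_monotonic_alt, pyGetD_head]
    rw [hbr]
    have hf : (fun (st : List Int × Int) (v : Int) =>
        if true && decide (st.2 ≤ v) then (st.1 ++ [v], v)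
        else if !true && decide (v ≤ st.2) then (st.1 ++ [v], v)
        else st)
      = (fun (st : List Int × Int) (v : Int) => if st.2 ≤ v then (st.1 ++ [v], v) else st) := by
      funext st v; simp
    rw [hf]
    simp only [Int.toNat_one, List.drop_one, List.tail_cons]
    rw [foldInc_aux]
    simp [scanB_inc xs x]
  | false =>
    simp only [make_monotonic, make_monotonic_alt, pyGetD_head]
    rw [hbr]
    have hf : (fun (st : List Int × Int) (v : Int) =>
        if false && decide (st.2 ≤ v) then (st.1 ++ [v], v)
        else if !false && decide (v ≤ st.2) then (st.1 ++ [v], v)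
        else st)
      = (fun (st : List Int × Int) (v : Int) => if v ≤ st.2 then (st.1 ++ [v], v) else st) := by
      funext st v; simp
    rw [hf]
    simp only [Int.toNat_one, List.drop_one, List.tail_cons]
    rw [foldDec_aux]
    simp [scanB_dec xs x]

-- ===== VERDICT (by name: the statement is the Claim_ definition above) =====
theorem make_monotonic_spec : Claim_equal_make_monotonic := by
  intro series increasing removeDuplicates _ hpre
  unfold Spec_make_monotonic
  cases series with
  | nil => exact absurd rfl hpre
  | cons x xs => exact make_monotonic_eq x xs increasing removeDuplicates
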